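-- pv_equiv track=rewrite | github.com/pypi-data/pypi-mirror-400 | packages/antsibull-nox/antsibull_nox-1.5.0-py3-none-any.whl/antsibull_nox/messages/utils.py | find_json
-- ===== SOURCE A (Python) =====
-- _JSON_END: dict[str, str] = {
--     "{": "}",
--     "[": "]",
-- }
--
-- _JSON_START: tuple[str, ...] = tuple(_JSON_END.keys())
--
-- def find_json(output: str) -> str:
--     """
--     Given output of a program, find a JSON object or list in it.
--
--     This function assumes that the object starts and ends in a line that does not
--     have any noise preceeding / succeeding it.
--     """
--     lines = output.splitlines()
--     for start, line in enumerate(lines):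
--         line = line.strip()
--         if line.startswith(_JSON_START):
--             end_char = _JSON_END[line[0]]
--             break
--     else:
--         # Didn't find start
--         return output
--     lines = lines[start:]
--     for end in range(len(lines) - 1, -1, -1):
--         if lines[end].strip().endswith(end_char):
--             break
--     else:
--         # Didn't find end
--         return output
--     lines = lines[: end + 1]
--     return "\n".join(lines)
-- ===== SOURCE B (Python) =====
-- def _drop_tail(lines, ec):
--     """Recursively drop trailing lines until the last one ends with ec; None if exhausted."""
--     if not lines:
--         return None
--     if lines[-1].strip().endswith(ec):
--         return lines
--     return _drop_tail(lines[:-1], ec)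
--
--
-- def _scan(lines):
--     """Recursively drop leading lines until one starts (stripped) with '{' or '['."""
--     if not lines:
--         return None
--     s = lines[0].strip()
--     if s.startswith(("{", "[")):
--         ec = "}" if s[0] == "{" else "]"
--         return _drop_tail(lines, ec)
--     return _scan(lines[1:])
--
--
-- def find_json(output: str) -> str:
--     """Index-free recursive version: peel leading non-start lines, then peel
--     trailing non-closing lines, and join the remaining block."""
--     block = _scan(output.splitlines())
--     return output if block is None else "\n".join(block)
-- ===== Notes on version B (the rewrite author's own statement) =====
-- stated objective: alternative
-- what changed: B is index-free and recursive: it peels leading lines until a JSON start line, then recursively peels trailing lines until one ends with the matching close char, returning the remaining line block itself (Optional[list]); A computes start/end indices with enumerate plus a backward range scan and slices the list by index.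
import Mathlib
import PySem

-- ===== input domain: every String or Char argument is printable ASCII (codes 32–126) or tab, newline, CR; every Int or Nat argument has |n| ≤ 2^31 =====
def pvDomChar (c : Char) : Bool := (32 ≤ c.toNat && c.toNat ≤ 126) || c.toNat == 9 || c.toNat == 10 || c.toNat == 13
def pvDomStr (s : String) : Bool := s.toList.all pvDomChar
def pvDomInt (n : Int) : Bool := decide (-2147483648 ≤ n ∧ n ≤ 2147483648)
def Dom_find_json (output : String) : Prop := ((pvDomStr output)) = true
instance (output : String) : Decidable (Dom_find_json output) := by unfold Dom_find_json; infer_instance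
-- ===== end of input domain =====

-- B is index-free and recursive: peel leading lines until a JSON start line, then peel
-- trailing lines until one ends with the matching close char; A computes indices and slices
-- (objective: alternative, same cost).

-- ===== PORT A =====
-- first loop of A: first line whose stripped text starts with "{" or "["
-- (startswith(tuple) checked prefix by prefix; end_char is _JSON_END of the first char,
--  which equals the matched prefix's closing bracket)
def pvFindStartA : List String → Nat → Option (Nat × String)
  | [], _ => none
  | l :: rest, i =>
    let s := PySem.Str.strip l
    if PySem.Str.startswith s "{" then some (i, "}")
    else if PySem.Str.startswith s "[" then some (i, "]")
    else pvFindStartA rest (i + 1)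

-- second loop of A: for end in range(len(lines)-1, -1, -1), break on first match
def pvFindEndA (lines : List String) (ec : String) : Nat → Option Nat
  | 0 => none
  | n + 1 =>
    if PySem.Str.endswith (PySem.Str.strip (lines.getD n "")) ec then some n
    else pvFindEndA lines ec n

def find_json (output : String) : String :=
  let lines := PySem.Str.splitlines output
  match pvFindStartA lines 0 with
  | none => output
  | some (start, ec) =>
    let lines2 := PySem.List.slice lines (some (start : Int)) none
    match pvFindEndA lines2 ec lines2.length with
    | none => output
    | some e => PySem.Str.join "\n" (PySem.List.slice lines2 none (some ((e : Int) + 1)))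

-- ===== PORT B =====
-- B's _drop_tail: recursively drop trailing lines until lines[-1] strips to end with ec
def pvDropTail (ec : String) : List String → Option (List String)
  | [] => none
  | x :: rest =>
    if PySem.Str.endswith (PySem.Str.strip (PySem.List.pyGetD (x :: rest) (-1) "")) ec
    then some (x :: rest)
    else pvDropTail ec (x :: rest).dropLast
termination_by l => l.length
decreasing_by simp [List.length_dropLast]

-- B's _scan: recursively drop leading lines until one starts (stripped) with "{" or "["
def pvScan : List String → Option (List String)
  | [] => none
  | l :: rest =>
    let s := PySem.Str.strip l
    if PySem.Str.startswith s "{" || PySem.Str.startswith s "[" then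
      pvDropTail (if PySem.Str.pyGet? s 0 == some '{' then "}" else "]") (l :: rest)
    else pvScan rest

def find_json_alt (output : String) : String :=
  match pvScan (PySem.Str.splitlines output) with
  | none => output
  | some block => PySem.Str.join "\n" block

-- ===== PRECONDITION & SPEC =====
def Spec_find_json (output : String) (out : String) : Prop := out = find_json_alt output
instance (output : String) (out : String) : Decidable (Spec_find_json output out) := by unfold Spec_find_json; infer_instance

-- ===== CLAIM (what is proved, stated in full; the proofs are below) =====
def Claim_equal_find_json : Prop := ∀ (output : String), Dom_find_json output → Spec_find_json output (find_json output)

-- ===== LEMMAS AND PROOFS =====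

-- A's start index is shift-equivariant in its counter
theorem pvStartA_shift : ∀ (l : List String) (i : Nat),
    pvFindStartA l i = (pvFindStartA l 0).map (fun p => (p.1 + i, p.2)) := by
  intro l
  induction l with
  | nil => intro i; rfl
  | cons x rest ih =>
    intro i
    simp only [pvFindStartA]
    split_ifs with h1 h2
    · simp
    · simp
    · rw [ih (i + 1), ih 1]
      cases pvFindStartA rest 0 with
      | none => rfl
      | some p => simp [Option.map]; omega

-- B's scan = A's start search followed by a tail-drop on the suffix
theorem pvScan_eq : ∀ (l : List String),
    pvScan l = match pvFindStartA l 0 with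
      | none => none
      | some (s, ec) => pvDropTail ec (l.drop s) := by
  intro l
  induction l with
  | nil => rfl
  | cons x rest ih =>
    simp only [pvScan, pvFindStartA, PySem.Str.startswith_eq, PySem.Str.pyGet?_eq]
    by_cases h1 : PySem.Chars.startswith (PySem.Str.strip x).toList "{".toList = true
    · have hget : PySem.Chars.pyGet? (PySem.Str.strip x).toList 0 = some '{' := by
        obtain ⟨t, ht⟩ := (PySem.Chars.startswith_iff _ _).mp h1
        rw [← ht]
        simp [PySem.Chars.pyGet?_eq_listPyGet?, PySem.List.pyGet?, PySem.List.pyIdx?]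
      have h1' : PySem.Chars.startswith (PySem.Chars.strip x.toList) ['{'] = true := by
        simpa using h1
      have hget' : PySem.List.pyGet? (PySem.Chars.strip x.toList) 0 = some '{' := by
        simpa using hget
      simp [h1', hget']
    · by_cases h2 : PySem.Chars.startswith (PySem.Str.strip x).toList "[".toList = true
      · have hget : PySem.Chars.pyGet? (PySem.Str.strip x).toList 0 = some '[' := by
          obtain ⟨t, ht⟩ := (PySem.Chars.startswith_iff _ _).mp h2
          rw [← ht]
          simp [PySem.Chars.pyGet?_eq_listPyGet?, PySem.List.pyGet?, PySem.List.pyIdx?]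
        have h1' : PySem.Chars.startswith (PySem.Chars.strip x.toList) ['{'] = false := by
          simpa using h1
        have h2' : PySem.Chars.startswith (PySem.Chars.strip x.toList) ['['] = true := by
          simpa using h2
        have hget' : PySem.List.pyGet? (PySem.Chars.strip x.toList) 0 = some '[' := by
          simpa using hget
        simp [h1', h2', hget']
      · simp only [h1, h2, ih, pvStartA_shift rest 1, Bool.or_eq_true]
        simp only [Bool.false_eq_true, if_false]
        cases pvFindStartA rest 0 with
        | none => rfl
        | some p => obtain ⟨s, ec⟩ := p; simp [List.drop_succ_cons]

-- the downward scan ignores elements at or above its fuel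
theorem pvFindEndA_append (l : List String) (x : String) (ec : String) :
    ∀ n, n ≤ l.length → pvFindEndA (l ++ [x]) ec n = pvFindEndA l ec n := by
  intro n
  induction n with
  | zero => intro _; rfl
  | succ m ih =>
    intro h
    have hm : m < l.length := by omega
    simp only [pvFindEndA]
    rw [List.getD_append _ _ _ _ hm, ih (by omega)]

-- one step of the downward scan from the top of l ++ [x]
theorem pvFindEndA_concat (l : List String) (x : String) (ec : String) :
    pvFindEndA (l ++ [x]) ec (l.length + 1) =
      if PySem.Str.endswith (PySem.Str.strip x) ec then some l.length
      else pvFindEndA l ec l.length := by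
  simp only [pvFindEndA]
  have hx : (l ++ [x]).getD l.length "" = x := by
    simp [List.getD]
  rw [hx, pvFindEndA_append l x ec l.length (le_refl _)]

-- the downward scan's result is below its fuel
theorem pvFindEndA_lt (l : List String) (ec : String) :
    ∀ n e, pvFindEndA l ec n = some e → e < n := by
  intro n
  induction n with
  | zero => intro e h; simp [pvFindEndA] at h
  | succ m ih =>
    intro e h
    simp only [pvFindEndA] at h
    split_ifs at h with hc
    · cases h; omega
    · have := ih e h; omega

-- unfolding pvDropTail on a nonempty list without naming its head
theorem pvDropTail_ne_nil (ec : String) (l : List String) (h : l ≠ []) :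
    pvDropTail ec l =
      if PySem.Str.endswith (PySem.Str.strip (PySem.List.pyGetD l (-1) "")) ec
      then some l else pvDropTail ec l.dropLast := by
  cases l with
  | nil => exact absurd rfl h
  | cons x rest => rw [pvDropTail]

-- B's recursive tail-drop = A's backward index scan followed by a take
theorem pvDropTail_eq (ec : String) (l : List String) :
    pvDropTail ec l = match pvFindEndA l ec l.length with
      | none => none
      | some e => some (l.take (e + 1)) := by
  induction l using List.reverseRecOn with
  | nil => simp [pvDropTail, pvFindEndA]
  | append_singleton m x ih =>
    rw [pvDropTail_ne_nil ec (m ++ [x]) (by simp)]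
    rw [List.length_append, List.length_singleton, pvFindEndA_concat,
      PySem.List.pyGetD_neg_one_append_singleton, List.dropLast_concat]
    by_cases h : PySem.Str.endswith (PySem.Str.strip x) ec = true
    · simp only [h, if_true]
      rw [List.take_of_length_le (by simp)]
    · simp only [h, if_false, Bool.false_eq_true, ih]
      cases he : pvFindEndA m ec m.length with
      | none => rfl
      | some e =>
        have hlt := pvFindEndA_lt m ec m.length e he
        simp only []
        rw [List.take_append_of_le_length (by omega)]

-- ===== VERDICT (by name: the statement is the Claim_ definition above) =====
theorem find_json_spec : Claim_equal_find_json := by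
  intro output _
  unfold Spec_find_json
  simp only [find_json, find_json_alt, pvScan_eq]
  cases hs : pvFindStartA (PySem.Str.splitlines output) 0 with
  | none => rfl
  | some p =>
    obtain ⟨start, ec⟩ := p
    simp only [PySem.List.slice_from_natCast, pvDropTail_eq]
    cases he : pvFindEndA ((PySem.Str.splitlines output).drop start) ec
        ((PySem.Str.splitlines output).drop start).length with
    | none => rfl
    | some e =>
      simp only []
      congr 1
      have h2 : ((e : Int) + 1) = (((e + 1 : Nat)) : Int) := by push_cast; ring
      rw [h2, PySem.List.slice_to_natCast]
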